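-- pv_equiv track=rewrite | github.com/srikantharun/test-api | hw/ip/token_manager/default/scripts/hjson_print.py | irq_gen_status
-- ===== SOURCE A (Python) =====
-- import math
--
-- def str_conv(str):
--   return str.upper().replace("-","_")
--
-- def irq_gen_status(connections, clist, ctype="prod", pref=""):
--   lines=[]
--   otype="cons" if ctype=="prod" else "prod"
--   producer_consumer = "producer" if ctype=="prod" else "consumer"
--   # get amount of needed fields:
--   fields=0
--   for pr in clist:
--     res=list(filter(lambda d: d[ctype] in pr, connections))
--     fields+=(len(res))
--
--   idx=0
--   postfix=''
--   for pr in clist: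
--     res=list(filter(lambda d: d[ctype] in pr, connections))
--     for i, d in enumerate(res):
--       ridx=math.floor(idx/64)
--       if idx%64==0:
--         if fields>64:
--           postfix=f'_{ridx}'
--           # close previous register if not first one
--           if math.floor(idx/64) > 0:
--             lines.append(f'      ]\n')
--             lines.append(f'    }},\n')
--         lines.append(f'    {{ name: "{pref}IRQ_GEN_SAT_{str_conv(ctype)}_STATUS{postfix}",\n')
--         lines.append(f'      desc: \'\'\'\n\
--           Status of the interupt of the token manager for the generic {producer_consumer} counter.\n\
--           The bits are sticky and cleared when writing a 1 to that bit.\n\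
--           Note: bit will be set again when the irq condition (saturation) is still there.\n\
--           \'\'\',\n')
--         lines.append(f'      swaccess: "rw1c",\n')
--         lines.append(f'      hwaccess: "hrw",\n')
--         lines.append(f'      fields: [\n')
--
--       lines.append(f'        {{\n')
--       lines.append(f'          bits: "{idx-ridx*64}"\n')
--       lines.append(f'          name: "{str_conv(d[ctype])}_TOK_{str_conv(ctype)}_{str_conv(d[otype])}"\n')
--       lines.append(f'          desc: "{str_conv(d[ctype])}_TOK_{str_conv(ctype)}_{str_conv(d[otype])} saturated and raised the IRQ."\n')
--       lines.append(f'          resval: 0x0\n')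
--       lines.append(f'        }}\n')
--       idx+=1
--   lines.append(f'      ]\n')
--   lines.append(f'    }},\n')
--   return (lines, fields)
-- ===== SOURCE B (Python) =====
-- def str_conv(str):
--   return str.upper().replace("-","_")
--
-- def irq_gen_status(connections, clist, ctype="prod", pref=""):
--   otype = "cons" if ctype == "prod" else "prod"
--   producer_consumer = "producer" if ctype == "prod" else "consumer"
--   # one flat pass: collect every matching connection once, in order
--   items = [d for pr in clist for d in connections if d[ctype] in pr]
--   fields = len(items)
--
--   header = (f'    {{ name: "{pref}IRQ_GEN_SAT_{str_conv(ctype)}_STATUS%s",\n',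
--             '      desc: \'\'\'\n'
--             '          Status of the interupt of the token manager for the generic '
--             f'{producer_consumer} counter.\n'
--             '          The bits are sticky and cleared when writing a 1 to that bit.\n'
--             '          Note: bit will be set again when the irq condition (saturation) is still there.\n'
--             '          \'\'\',\n',
--             '      swaccess: "rw1c",\n',
--             '      hwaccess: "hrw",\n',
--             '      fields: [\n')
--   closers = ['      ]\n', '    },\n']
--
--   lines = []
--   r = 0
--   rest = items
--   while rest:
--     chunk, rest = rest[:64], rest[64:]
--     if r > 0:
--       lines += closers
--     postfix = '' if fields <= 64 else f'_{r}'
--     lines.append(header[0] % postfix)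
--     lines += header[1:]
--     for p, d in enumerate(chunk):
--       nm = f'{str_conv(d[ctype])}_TOK_{str_conv(ctype)}_{str_conv(d[otype])}'
--       lines += [f'        {{\n',
--                 f'          bits: "{p}"\n',
--                 f'          name: "{nm}"\n',
--                 f'          desc: "{nm} saturated and raised the IRQ."\n',
--                 f'          resval: 0x0\n',
--                 f'        }}\n']
--     r += 1
--   lines += closers
--   return (lines, fields)
-- ===== Notes on version B (the rewrite author's own statement) =====
-- stated objective: simpler
-- what changed: A filters connections per clist entry twice (a counting pass plus an emission pass) and threads a running idx/ridx/postfix state through nested loops; B builds the flat matched-items list once and emits it in explicit 64-wide chunks with per-chunk field positions, appending the trailing close lines unconditionally.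
import Mathlib
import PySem

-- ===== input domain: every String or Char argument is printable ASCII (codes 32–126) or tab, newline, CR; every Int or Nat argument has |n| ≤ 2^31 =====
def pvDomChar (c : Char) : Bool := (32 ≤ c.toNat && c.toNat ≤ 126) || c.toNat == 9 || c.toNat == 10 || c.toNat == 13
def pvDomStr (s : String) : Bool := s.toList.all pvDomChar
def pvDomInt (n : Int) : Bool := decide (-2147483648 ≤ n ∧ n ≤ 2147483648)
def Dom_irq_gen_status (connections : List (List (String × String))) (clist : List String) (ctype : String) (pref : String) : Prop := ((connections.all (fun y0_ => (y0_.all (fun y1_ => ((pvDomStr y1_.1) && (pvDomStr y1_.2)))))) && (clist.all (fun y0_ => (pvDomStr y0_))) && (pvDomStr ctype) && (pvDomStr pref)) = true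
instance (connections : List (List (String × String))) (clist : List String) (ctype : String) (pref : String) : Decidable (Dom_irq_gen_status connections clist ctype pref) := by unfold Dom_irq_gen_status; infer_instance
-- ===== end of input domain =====

-- B replaces A's two-pass nested loops (filter per clist entry, done twice, with a running idx/pfx state)
-- by one flat matched-items list split into 64-wide chunks emitted per chunk; objective: simpler decomposition.
-- A raises KeyError on missing dict keys; those inputs are outside Pre_.

-- ===== PORT A =====
-- shared leaf helpers (exact strings both Pythons emit)
def pvGet (d : List (String × String)) (k : String) : String :=
  ((PySem.Dict.mk d).get? k).getD ""   -- d[k]; Pre_ guarantees the key is present where A evaluates it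
def strConv (s : String) : String := PySem.Str.replace (PySem.Str.upper s) "-" "_"
def natStr (n : Nat) : String := PySem.Int.toStr (n : Int)
def hdrName (pref ctype pfx : String) : String :=
  "    { name: \"" ++ pref ++ "IRQ_GEN_SAT_" ++ strConv ctype ++ "_STATUS" ++ pfx ++ "\",\n"
def hdrDesc (pc : String) : String :=
  "      desc: '''\n          Status of the interupt of the token manager for the generic " ++ pc ++ " counter.\n          The bits are sticky and cleared when writing a 1 to that bit.\n          Note: bit will be set again when the irq condition (saturation) is still there.\n          ''',\n"
def hdrSw : String := "      swaccess: \"rw1c\",\n"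
def hdrHw : String := "      hwaccess: \"hrw\",\n"
def hdrFlds : String := "      fields: [\n"
def cls1 : String := "      ]\n"
def cls2 : String := "    },\n"
def fldName (ctype otype : String) (d : List (String × String)) : String :=
  strConv (pvGet d ctype) ++ "_TOK_" ++ strConv ctype ++ "_" ++ strConv (pvGet d otype)
def fldLines (bits : Nat) (nm : String) : List String :=
  ["        {\n",
   "          bits: \"" ++ natStr bits ++ "\"\n",
   "          name: \"" ++ nm ++ "\"\n",
   "          desc: \"" ++ nm ++ " saturated and raised the IRQ.\"\n",
   "          resval: 0x0\n",
   "        }\n"]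

def resFilter (connections : List (List (String × String))) (ctype pr : String) : List (List (String × String)) :=
  connections.filter (fun d => PySem.Str.isIn (pvGet d ctype) pr)

-- A's loop body for one connection d (state = (lines, idx, pfx))
def stepA (fields : Nat) (ctype otype pc pref : String)
    (s : List String × Nat × String) (d : List (String × String)) : List String × Nat × String :=
  let lines := s.1
  let idx := s.2.1
  let pfx := s.2.2
  let ridx := idx / 64
  if idx % 64 = 0 then
    let pl : String × List String :=
      if 64 < fields then
        ("_" ++ natStr ridx, if 0 < ridx then lines ++ [cls1] ++ [cls2] else lines)
      else (pfx, lines)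
    let lines := pl.2 ++ [hdrName pref ctype pl.1] ++ [hdrDesc pc] ++ [hdrSw] ++ [hdrHw] ++ [hdrFlds]
    (lines ++ fldLines (idx - ridx * 64) (fldName ctype otype d), idx + 1, pl.1)
  else
    (lines ++ fldLines (idx - ridx * 64) (fldName ctype otype d), idx + 1, pfx)

def irq_gen_status (connections : List (List (String × String))) (clist : List String) (ctype : String) (pref : String) : List String × Int :=
  let otype := if ctype == "prod" then "cons" else "prod"
  let pc := if ctype == "prod" then "producer" else "consumer"
  let fields := clist.foldl (fun acc pr => acc + (resFilter connections ctype pr).length) 0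
  let fin := clist.foldl (fun s pr =>
      (PySem.List.enumerate (resFilter connections ctype pr) 0).foldl
        (fun s id => stepA fields ctype otype pc pref s id.2) s) ([], 0, "")
  (fin.1 ++ [cls1] ++ [cls2], (fields : Int))

-- ===== PORT B =====
-- the per-chunk inner loop: for p, d in enumerate(chunk): lines += field block
def emitFields (ctype otype : String) (p : Nat) (chunk : List (List (String × String))) : List String :=
  match chunk with
  | [] => []
  | d :: rest => fldLines p (fldName ctype otype d) ++ emitFields ctype otype (p + 1) rest

-- the while loop: peel 64-item chunks off the flat items list
def emitChunks (ctype otype pc pref : String) (fields r : Nat)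
    (rest : List (List (String × String))) : List String :=
  match rest with
  | [] => []
  | d :: tl =>
    let chunk := PySem.List.slice (d :: tl) none (some (64 : Int))
    let rest' := PySem.List.slice (d :: tl) (some (64 : Int)) none
    (if 0 < r then [cls1, cls2] else []) ++
    [hdrName pref ctype (if fields ≤ 64 then "" else "_" ++ natStr r), hdrDesc pc, hdrSw, hdrHw, hdrFlds] ++
    emitFields ctype otype 0 chunk ++
    emitChunks ctype otype pc pref fields (r + 1) rest'
  termination_by rest.length
  decreasing_by
    simp [PySem.List.slice_some_none, PySem.List.clampIdx]

def irq_gen_status_alt (connections : List (List (String × String))) (clist : List String) (ctype : String) (pref : String) : List String × Int :=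
  let otype := if ctype == "prod" then "cons" else "prod"
  let pc := if ctype == "prod" then "producer" else "consumer"
  let items := clist.flatMap (fun pr => connections.filter (fun d => PySem.Str.isIn (pvGet d ctype) pr))
  let fields := items.length
  (emitChunks ctype otype pc pref fields 0 items ++ [cls1, cls2], (fields : Int))

-- ===== PRECONDITION & SPEC =====
-- Pre_ excludes exactly the inputs where Python A raises KeyError: when clist is nonempty A looks up
-- d[ctype] in every connection, and d[otype] in every connection whose d[ctype] matches some clist entry.
def Pre_irq_gen_status (connections : List (List (String × String))) (clist : List String) (ctype : String) (pref : String) : Prop :=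
  ∀ d ∈ connections, clist ≠ [] →
    ((PySem.Dict.mk d).get? ctype).isSome = true ∧
    ((∃ pr ∈ clist, PySem.Str.isIn (pvGet d ctype) pr = true) →
      ((PySem.Dict.mk d).get? (if ctype == "prod" then "cons" else "prod")).isSome = true)
instance (connections : List (List (String × String))) (clist : List String) (ctype : String) (pref : String) : Decidable (Pre_irq_gen_status connections clist ctype pref) := by unfold Pre_irq_gen_status; infer_instance

def pvWitness_irq_gen_status : (List (List (String × String))) × List String × String × String :=
  ([[("prod", "a-b"), ("cons", "x")]], ["a-b-c"], "prod", "P_")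

def Spec_irq_gen_status (connections : List (List (String × String))) (clist : List String) (ctype : String) (pref : String) (out : List String × Int) : Prop := out = irq_gen_status_alt connections clist ctype pref
instance (connections : List (List (String × String))) (clist : List String) (ctype : String) (pref : String) (out : List String × Int) : Decidable (Spec_irq_gen_status connections clist ctype pref out) := by unfold Spec_irq_gen_status; infer_instance

-- ===== CLAIM (what is proved, stated in full; the proofs are below) =====
def Claim_equal_irq_gen_status : Prop := ∀ (connections : List (List (String × String))) (clist : List String) (ctype : String) (pref : String), Dom_irq_gen_status connections clist ctype pref → Pre_irq_gen_status connections clist ctype pref → Spec_irq_gen_status connections clist ctype pref (irq_gen_status connections clist ctype pref)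

-- ===== LEMMAS AND PROOFS =====

-- chunk slices as take/drop
theorem sliceTo64 {α : Type} (d : α) (rest : List α) : PySem.List.slice (d :: rest) none (some (64:Int)) = d :: rest.take 63 := by
  simp [PySem.List.slice, PySem.List.clampIdx, List.take_cons]
  omega

theorem sliceFrom64 {α : Type} (d : α) (rest : List α) : PySem.List.slice (d :: rest) (some (64:Int)) none = rest.drop 63 := by
  simp [PySem.List.slice, PySem.List.clampIdx]
  by_cases h : 63 ≤ rest.length
  · rw [show min 64 (rest.length + 1) = 64 from by omega]
    rw [show (64:Nat) = 63 + 1 from rfl, List.drop_succ_cons]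
    exact List.take_of_length_le (by simp only [List.length_drop]; omega)
  · rw [show min 64 (rest.length + 1) = rest.length + 1 from by omega]
    simp [List.drop_eq_nil_of_le (by simp : (d :: rest).length ≤ rest.length + 1),
          List.drop_eq_nil_of_le (by omega : rest.length ≤ 63)]

-- the enumerate index is unused in A's inner loop
theorem foldl_enumerate_stepA (F : Nat) (c o pc pf : String) :
    ∀ (res : List (List (String × String))) (k : Int) (s : List String × Nat × String),
    (PySem.List.enumerate res k).foldl (fun s id => stepA F c o pc pf s id.2) s
      = res.foldl (stepA F c o pc pf) s := by
  intro res
  induction res with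
  | nil => intro k s; simp [PySem.List.enumerate]
  | cons d tl ih => intro k s; simp [PySem.List.enumerate_cons, ih]

-- A's outer loop over clist is a fold over the flattened matched-items list
theorem foldl_clist_flatMap (conns : List (List (String × String))) (c : String)
    (g : (List String × Nat × String) → List (String × String) → List String × Nat × String) :
    ∀ (cl : List String) (s : List String × Nat × String),
    cl.foldl (fun s pr => (resFilter conns c pr).foldl g s) s
      = (cl.flatMap (resFilter conns c)).foldl g s := by
  intro cl
  induction cl with
  | nil => intro s; simp
  | cons pr tl ih => intro s; simp [List.foldl_append, ih]

-- A's counting pass equals the length of the flat items list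
theorem fields_eq_length (conns : List (List (String × String))) (c : String) :
    ∀ (cl : List String) (n : Nat),
    cl.foldl (fun acc pr => acc + (resFilter conns c pr).length) n
      = n + (cl.flatMap (resFilter conns c)).length := by
  intro cl
  induction cl with
  | nil => intro n; simp
  | cons pr tl ih => intro n; simp [ih]; omega

-- within a chunk (position j ≥ 1): stepA just appends one field block per item
theorem stepA_plain (F : Nat) (c o pc pf : String) :
    ∀ (M : List (List (String × String))) (r j : Nat) (lines : List String) (p : String),
    0 < j → j + M.length ≤ 64 →
    M.foldl (stepA F c o pc pf) (lines, 64 * r + j, p)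
      = (lines ++ emitFields c o j M, 64 * r + j + M.length, p) := by
  intro M
  induction M with
  | nil => intro r j lines p h1 h2; simp [emitFields]
  | cons d tl ih =>
    intro r j lines p h1 h2
    simp only [List.length_cons] at h2
    have hm : (64 * r + j) % 64 = j := by omega
    have hd : (64 * r + j) / 64 = r := by omega
    simp only [List.foldl_cons, stepA, hm, hd]
    rw [show 64 * r + j - r * 64 = j from by omega]
    rw [if_neg (by omega)]
    have := ih r (j + 1) (lines ++ fldLines j (fldName c o d)) p (by omega) (by omega)
    have harg : 64 * r + j + 1 = 64 * r + (j + 1) := by omega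
    rw [harg, this]
    simp [emitFields]
    omega

-- one 64-chunk at a time: A's fold from a chunk boundary produces exactly B's chunk output
theorem stepA_chunks (F : Nat) (c o pc pf : String) :
    ∀ (n : Nat) (L : List (List (String × String))) (r : Nat) (lines : List String) (p : String),
    L.length = n →
    (64 < F ∨ (r = 0 ∧ p = "" ∧ L.length ≤ 64)) →
    ∃ p', L.foldl (stepA F c o pc pf) (lines, 64 * r, p)
      = (lines ++ emitChunks c o pc pf F r L, 64 * r + L.length, p') := by
  intro n
  induction n using Nat.strong_induction_on with
  | _ n ih =>
    intro L r lines p hlen hside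
    match L with
    | [] => exact ⟨p, by simp [emitChunks]⟩
    | d :: rest =>
      simp only [List.length_cons] at hlen hside
      have hm : (64 * r) % 64 = 0 := by omega
      have hd64 : (64 * r) / 64 = r := by omega
      -- state after the first item of the chunk: header (and closers for r > 0)
      have hstep : stepA F c o pc pf (lines, 64 * r, p) d
          = (lines ++ (if 0 < r then [cls1, cls2] else []) ++
              [hdrName pf c (if F ≤ 64 then "" else "_" ++ natStr r), hdrDesc pc, hdrSw, hdrHw, hdrFlds] ++
              fldLines 0 (fldName c o d), 64 * r + 1,
              if 64 < F then "_" ++ natStr r else p) := by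
        simp only [stepA, hm, hd64]
        by_cases hF : 64 < F
        · have hFle : ¬ F ≤ 64 := by omega
          by_cases hr : 0 < r
          · simp [hF, hFle, hr, show 64 * r - r * 64 = 0 from by omega, List.append_assoc]
          · simp [hF, hFle, hr, show 64 * r - r * 64 = 0 from by omega, List.append_assoc]
        · have hr0 : r = 0 ∧ p = "" := by
            rcases hside with h | ⟨h1, h2, _⟩
            · omega
            · exact ⟨h1, h2⟩
          simp [hF, show F ≤ 64 from by omega, hr0.1, hr0.2, List.append_assoc]
      have hsplit : rest = rest.take 63 ++ rest.drop 63 := (List.take_append_drop 63 rest).symm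
      have hMlen : (rest.take 63).length = min 63 rest.length := by simp
      have hplain := stepA_plain F c o pc pf (rest.take 63) r 1 (lines ++ (if 0 < r then [cls1, cls2] else []) ++
          [hdrName pf c (if F ≤ 64 then "" else "_" ++ natStr r), hdrDesc pc, hdrSw, hdrHw, hdrFlds] ++
          fldLines 0 (fldName c o d)) (if 64 < F then "_" ++ natStr r else p) (by omega) (by omega)
      have hexp : emitChunks c o pc pf F r (d :: rest)
          = (if 0 < r then [cls1, cls2] else []) ++
            [hdrName pf c (if F ≤ 64 then "" else "_" ++ natStr r), hdrDesc pc, hdrSw, hdrHw, hdrFlds] ++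
            fldLines 0 (fldName c o d) ++ emitFields c o 1 (rest.take 63) ++
            emitChunks c o pc pf F (r + 1) (rest.drop 63) := by
        rw [emitChunks, sliceTo64, sliceFrom64]
        simp [emitFields, List.append_assoc]
      by_cases hRnil : rest.length ≤ 63
      · -- single (last) chunk
        have hReq : rest.drop 63 = [] := List.drop_eq_nil_of_le hRnil
        have hMeq : rest.take 63 = rest := List.take_of_length_le hRnil
        refine ⟨if 64 < F then "_" ++ natStr r else p, ?_⟩
        rw [List.foldl_cons, hstep]
        conv_lhs => rw [hsplit]
        rw [List.foldl_append, hplain, hReq, hMeq]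
        simp [emitChunks, hexp, hReq, hMeq, List.append_assoc]
        omega
      · -- full chunk of 64, recurse on the remainder
        have hF64 : 64 < F := by
          rcases hside with h | ⟨_, _, h3⟩
          · exact h
          · omega
        obtain ⟨p', hrec⟩ := ih (rest.drop 63).length (by simp; omega) (rest.drop 63) (r + 1)
          (lines ++ (if 0 < r then [cls1, cls2] else []) ++
            [hdrName pf c (if F ≤ 64 then "" else "_" ++ natStr r), hdrDesc pc, hdrSw, hdrHw, hdrFlds] ++
            fldLines 0 (fldName c o d) ++ emitFields c o 1 (rest.take 63))
          (if 64 < F then "_" ++ natStr r else p) rfl (Or.inl hF64)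
        refine ⟨p', ?_⟩
        rw [List.foldl_cons, hstep]
        conv_lhs => rw [hsplit]
        rw [List.foldl_append, hplain]
        rw [show 64 * r + 1 + (rest.take 63).length = 64 * (r + 1) from by simp; omega]
        rw [hrec, hexp]
        simp [List.append_assoc]
        omega

-- ===== VERDICT (by name: the statement is the Claim_ definition above) =====
theorem irq_gen_status_spec : Claim_equal_irq_gen_status := by
  intro conns clist ctype pref _ _
  unfold Spec_irq_gen_status
  simp only [irq_gen_status, irq_gen_status_alt]
  have hres : (fun pr => conns.filter (fun d => PySem.Str.isIn (pvGet d ctype) pr)) = resFilter conns ctype := rfl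
  rw [hres]
  have hF : clist.foldl (fun acc pr => acc + (resFilter conns ctype pr).length) 0
      = (clist.flatMap (resFilter conns ctype)).length := by
    rw [fields_eq_length, Nat.zero_add]
  rw [hF]
  have h1 : clist.foldl (fun s pr =>
      (PySem.List.enumerate (resFilter conns ctype pr) 0).foldl
        (fun s id => stepA (clist.flatMap (resFilter conns ctype)).length ctype
          (if ctype == "prod" then "cons" else "prod")
          (if ctype == "prod" then "producer" else "consumer") pref s id.2) s)
      (([], 0, "") : List String × Nat × String)
      = (clist.flatMap (resFilter conns ctype)).foldl
          (stepA (clist.flatMap (resFilter conns ctype)).length ctype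
            (if ctype == "prod" then "cons" else "prod")
            (if ctype == "prod" then "producer" else "consumer") pref) ([], 0, "") := by
    rw [← foldl_clist_flatMap]
    congr 1
    funext s pr
    rw [foldl_enumerate_stepA]
  rw [h1]
  obtain ⟨p', hch⟩ := stepA_chunks (clist.flatMap (resFilter conns ctype)).length ctype
    (if ctype == "prod" then "cons" else "prod")
    (if ctype == "prod" then "producer" else "consumer") pref
    (clist.flatMap (resFilter conns ctype)).length (clist.flatMap (resFilter conns ctype)) 0 [] "" rfl
    (by
      by_cases h : 64 < (clist.flatMap (resFilter conns ctype)).length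
      · exact Or.inl h
      · exact Or.inr ⟨rfl, rfl, by omega⟩)
  simp only [Nat.mul_zero] at hch
  rw [hch]
  simp [List.append_assoc]
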